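-- pv_equiv track=rewrite | github.com/Sanghyeok-Jeon/Algorithms_Python | 백준/Silver/3613. Java vs C＋＋/Java vs C＋＋.py | convert_style
-- ===== SOURCE A (Python) =====
-- def convert_style(name):
--     if name[0] == '_' or name[-1] == '_' or '__' in name:
--         return 'Error!'
--
--     if '_' in name and any(c.isupper() for c in name):
--         return 'Error!'
--
--     if '_' in name:
--         result = ''
--         upper = False
--         for ch in name:
--             if ch == '_':
--                 upper = True
--             else:
--                 result += ch.upper() if upper else ch
--                 upper = False
--         return result
--
--     elif any(c.isupper() for c in name):
--         if name[0].isupper():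
--             return 'Error!'
--         result = ''
--         for ch in name:
--             if ch.isupper():
--                 result += '_' + ch.lower()
--             else:
--                 result += ch
--         return result
--
--     else:
--         return name
-- ===== SOURCE B (Python) =====
-- def convert_style(name):
--     if name[0] == '_' or name[-1] == '_' or '__' in name:
--         return 'Error!'
--     if '_' in name:
--         if any(c.isupper() for c in name):
--             return 'Error!'
--         parts = name.split('_')
--         return parts[0] + ''.join(w[0].upper() + w[1:] for w in parts[1:])
--     if any(c.isupper() for c in name):
--         if name[0].isupper():
--             return 'Error!'
--         return ''.join('_' + c.lower() if c.isupper() else c for c in name)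
--     return name
-- ===== Notes on version B (the rewrite author's own statement) =====
-- stated objective: idiomatic
-- what changed: The snake_case->camelCase branch is rebuilt as a token-level split('_') + capitalize-and-join instead of the char-by-char 'upper' flag state machine, and the camelCase->snake_case branch becomes a single join over a generator instead of string accumulation.
import Mathlib
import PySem

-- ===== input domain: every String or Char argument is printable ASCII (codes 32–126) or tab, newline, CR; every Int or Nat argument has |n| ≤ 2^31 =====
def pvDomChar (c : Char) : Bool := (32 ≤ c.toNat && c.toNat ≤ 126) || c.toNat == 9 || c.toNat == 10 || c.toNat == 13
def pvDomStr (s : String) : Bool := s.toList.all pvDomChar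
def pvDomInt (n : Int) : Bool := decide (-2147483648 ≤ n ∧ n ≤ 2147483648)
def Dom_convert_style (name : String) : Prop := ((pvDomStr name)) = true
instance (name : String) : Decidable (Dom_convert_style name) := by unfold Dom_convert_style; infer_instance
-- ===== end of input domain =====

-- B replaces the snake->camel char-by-char flag state machine with split('_') + capitalize-join,
-- and the camel->snake accumulator loop with a join over a per-character generator (same cost, more idiomatic).


-- ===== PORT A =====
def convert_style (name : String) : String :=
  let cs := name.toList
  if PySem.List.pyGet? cs 0 == some '_' || PySem.List.pyGet? cs (-1) == some '_'
      || PySem.Chars.isIn ['_', '_'] cs then "Error!"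
  else if PySem.Chars.isIn ['_'] cs && cs.any PySem.Chars.isupper then "Error!"
  else if PySem.Chars.isIn ['_'] cs then
    -- result/upper accumulator loop: result += ch.upper() if upper else ch
    String.ofList (cs.foldl (fun (st : List Char × Bool) ch =>
      if ch = '_' then (st.1, true)
      else (st.1 ++ [if st.2 then PySem.Chars.upperChar ch else ch], false)) ([], false)).1
  else if cs.any PySem.Chars.isupper then
    if PySem.Chars.isupper (cs.headD ' ') then "Error!"  -- headD totalizes name[0]; this branch implies cs ≠ []
    else String.ofList (cs.foldl (fun acc ch =>
      if PySem.Chars.isupper ch then acc ++ ['_', PySem.Chars.lowerChar ch] else acc ++ [ch]) [])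
  else name

-- ===== PORT B =====
-- w[0].upper() + w[1:] (guards guarantee w ≠ [] where Source B applies it)
def capWord (w : List Char) : List Char :=
  match w with
  | [] => []
  | c :: t => PySem.Chars.upperChar c :: t

def convert_style_alt (name : String) : String :=
  let cs := name.toList
  if PySem.List.pyGet? cs 0 == some '_' || PySem.List.pyGet? cs (-1) == some '_'
      || PySem.Chars.isIn ['_', '_'] cs then "Error!"
  else if PySem.Chars.isIn ['_'] cs then
    if cs.any PySem.Chars.isupper then "Error!"
    else
      let parts := cs.splitOn '_'   -- name.split('_')
      String.ofList (parts.headD [] ++ parts.tail.flatMap capWord)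
  else if cs.any PySem.Chars.isupper then
    if PySem.Chars.isupper (cs.headD ' ') then "Error!"
    else String.ofList (cs.flatMap (fun ch =>
      if PySem.Chars.isupper ch then ['_', PySem.Chars.lowerChar ch] else [ch]))
  else name

-- ===== PRECONDITION & SPEC =====
-- Pre_ excludes only the empty string, on which both A and B raise IndexError at name[0].
def Pre_convert_style (name : String) : Prop := name ≠ ""
instance (name : String) : Decidable (Pre_convert_style name) := by unfold Pre_convert_style; infer_instance
def pvWitness_convert_style : String := "my_name"
def Spec_convert_style (name : String) (out : String) : Prop := out = convert_style_alt name
instance (name : String) (out : String) : Decidable (Spec_convert_style name out) := by unfold Spec_convert_style; infer_instance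

-- ===== CLAIM (what is proved, stated in full; the proofs are below) =====
def Claim_equal_convert_style : Prop := ∀ (name : String), Dom_convert_style name → Pre_convert_style name → Spec_convert_style name (convert_style name)

-- ===== LEMMAS AND PROOFS =====

-- A's snake-branch loop, as a structural recursion on the characters.
def goA (cs : List Char) (b : Bool) : List Char :=
  match cs with
  | [] => []
  | c :: t => if c == '_' then goA t true else (if b then PySem.Chars.upperChar c else c) :: goA t false

theorem foldA_eq_goA (cs : List Char) (acc : List Char) (b : Bool) :
    (cs.foldl (fun (st : List Char × Bool) ch =>
      if ch = '_' then (st.1, true)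
      else (st.1 ++ [if st.2 then PySem.Chars.upperChar ch else ch], false)) (acc, b)).1
    = acc ++ goA cs b := by
  induction cs generalizing acc b with
  | nil => simp [goA]
  | cons c t ih =>
    by_cases h : c = '_'
    · subst h; simp [goA, ih]
    · simp [goA, h, ih]

theorem splitOn_ne_nil (cs : List Char) : cs.splitOn '_' ≠ [] := by
  simp [List.splitOn, List.splitOnP_ne_nil]

-- B's split/capitalize/join, with b recording whether the head token is capitalized too.
theorem goA_eq_split (cs : List Char) (b : Bool) :
    goA cs b = (if b then capWord ((cs.splitOn '_').headD []) else (cs.splitOn '_').headD [])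
      ++ (cs.splitOn '_').tail.flatMap capWord := by
  induction cs generalizing b with
  | nil => cases b <;> simp [goA, List.splitOn, List.splitOnP_nil, capWord]
  | cons c t ih =>
    obtain ⟨h0, rt, hsp⟩ : ∃ h0 rt, t.splitOn '_' = h0 :: rt := by
      cases hq : t.splitOn '_' with
      | nil => exact absurd hq (splitOn_ne_nil t)
      | cons x y => exact ⟨x, y, rfl⟩
    have hsp' : List.splitOnP (fun x => x == '_') t = h0 :: rt := by
      simpa [List.splitOn] using hsp
    by_cases h : c = '_'
    · subst h
      have hc : (('_' : Char) :: t).splitOn '_' = [] :: h0 :: rt := by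
        simp [List.splitOn, List.splitOnP_cons, hsp']
      rw [goA]
      simp only [beq_self_eq_true, if_true, hc, ih true]
      cases b <;> simp [capWord, hsp]
    · have hc : (c :: t).splitOn '_' = (c :: h0) :: rt := by
        simp [List.splitOn, List.splitOnP_cons, h, hsp']
      rw [goA]
      simp only [beq_iff_eq, h, if_false, hc, ih false]
      cases b <;> simp [capWord, hsp]

theorem snake_eq (cs : List Char) :
    (cs.foldl (fun (st : List Char × Bool) ch =>
      if ch = '_' then (st.1, true)
      else (st.1 ++ [if st.2 then PySem.Chars.upperChar ch else ch], false)) ([], false)).1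
    = (cs.splitOn '_').headD [] ++ (cs.splitOn '_').tail.flatMap capWord := by
  rw [foldA_eq_goA, goA_eq_split]; simp

theorem foldCam_eq_flatMap (cs : List Char) (acc : List Char) :
    cs.foldl (fun acc ch =>
      if PySem.Chars.isupper ch then acc ++ ['_', PySem.Chars.lowerChar ch] else acc ++ [ch]) acc
    = acc ++ cs.flatMap (fun ch =>
      if PySem.Chars.isupper ch then ['_', PySem.Chars.lowerChar ch] else [ch]) := by
  induction cs generalizing acc with
  | nil => simp
  | cons c t ih =>
    by_cases h : PySem.Chars.isupper c <;> simp [h, ih]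

-- ===== VERDICT (by name: the statement is the Claim_ definition above) =====
theorem convert_style_spec : Claim_equal_convert_style := by
  intro name _ _
  unfold Spec_convert_style convert_style convert_style_alt
  by_cases h1 : (PySem.List.pyGet? name.toList 0 == some '_' || PySem.List.pyGet? name.toList (-1) == some '_'
      || PySem.Chars.isIn ['_', '_'] name.toList) = true
  · simp [h1]
  · by_cases h2 : PySem.Chars.isIn ['_'] name.toList = true
    · by_cases h3 : name.toList.any PySem.Chars.isupper = true
      · simp [h1, h2, h3]
      · simp only [h1, h2, h3, Bool.false_eq_true, if_false, Bool.and_eq_true, and_false,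
          if_true, if_false]
        rw [snake_eq]
    · by_cases h3 : name.toList.any PySem.Chars.isupper = true
      · simp only [h1, h2, h3, Bool.false_eq_true, Bool.and_eq_true, false_and, if_false, if_true]
        split_ifs with h4
        · rfl
        · rw [foldCam_eq_flatMap]
          simp
      · simp [h1, h2, h3]
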